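-- pv_equiv track=rewrite | github.com/wsyjh8/sen-tang-speech | mvp/phase1_test/app/acoustic/step2_pace_pause.py | _speech_flags_to_pause_segments
-- ===== SOURCE A (Python) =====
-- from typing import List, Dict, Any, Optional, Tuple
--
-- def _speech_flags_to_pause_segments(
--     flags: List[bool],
--     frame_ms: int = 30
-- ) -> List[Dict[str, int]]:
--     """
--     Convert speech flags to pause segments.
--
--     Continuous non-speech frames form a pause_segment.
--     start_ms/end_ms calculated from frame boundaries.
--     duration_ms = end_ms - start_ms.
--
--     Args:
--         flags: list of bool (True=speech, False=silence)
--         frame_ms: frame duration in ms (default 30)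
--
--     Returns:
--         list of {"start_ms": int, "end_ms": int, "duration_ms": int}
--     """
--     if not flags:
--         return []
--
--     pause_segments = []
--     in_pause = False
--     start_ms = 0
--
--     for i, is_speech in enumerate(flags):
--         t_ms = i * frame_ms
--         if not is_speech and not in_pause:
--             # Pause start
--             in_pause = True
--             start_ms = t_ms
--         elif is_speech and in_pause:
--             # Pause end
--             in_pause = False
--             pause_segments.append({
--                 "start_ms": start_ms,
--                 "end_ms": t_ms,
--                 "duration_ms": t_ms - start_ms,
--             })
--
--     # Handle pause continuing to end
--     if in_pause:
--         duration_ms = len(flags) * frame_ms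
--         pause_segments.append({
--             "start_ms": start_ms,
--             "end_ms": duration_ms,
--             "duration_ms": duration_ms - start_ms,
--         })
--
--     return pause_segments
-- ===== SOURCE B (Python) =====
-- def _speech_flags_to_pause_segments(flags, frame_ms=30):
--     pause_segments = []
--     i = 0
--     n = len(flags)
--     while i < n:
--         v = flags[i]
--         j = i + 1
--         while j < n and flags[j] == v:
--             j += 1
--         if not v:
--             pause_segments.append({
--                 "start_ms": i * frame_ms,
--                 "end_ms": j * frame_ms,
--                 "duration_ms": (j - i) * frame_ms,
--             })
--         i = j
--     return pause_segments
-- ===== Notes on version B (the rewrite author's own statement) =====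
-- stated objective: alternative
-- what changed: Replaces the in_pause latch with a run-grouping scan: each maximal run of equal flags is consumed at once and a segment is emitted per non-speech run, with no state machine and no separate tail-pause fixup.
import Mathlib
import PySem

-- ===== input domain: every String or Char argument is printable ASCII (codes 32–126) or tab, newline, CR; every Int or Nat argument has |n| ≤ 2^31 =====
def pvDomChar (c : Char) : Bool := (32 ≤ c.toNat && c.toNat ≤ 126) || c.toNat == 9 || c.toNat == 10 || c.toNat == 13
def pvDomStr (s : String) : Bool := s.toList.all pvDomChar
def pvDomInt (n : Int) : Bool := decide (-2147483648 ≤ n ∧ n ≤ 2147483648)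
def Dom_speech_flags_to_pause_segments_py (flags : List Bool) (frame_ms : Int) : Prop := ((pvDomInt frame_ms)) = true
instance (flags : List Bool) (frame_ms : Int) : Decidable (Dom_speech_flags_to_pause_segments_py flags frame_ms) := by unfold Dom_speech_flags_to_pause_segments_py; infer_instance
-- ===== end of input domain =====

-- B groups maximal runs of equal flags and emits one segment per non-speech run,
-- replacing A's in_pause latch and tail fixup (objective: alternative decomposition, same cost).

-- ===== PORT A =====
-- the dict literal A appends (insertion order)
def pvMkSegA (s e : Int) : List (String × Int) :=
  [("start_ms", s), ("end_ms", e), ("duration_ms", e - s)]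

-- A's for-loop over enumerate(flags): state (pause_segments, in_pause, start_ms)
def pvAGo (frame_ms : Int) : List Bool → Int → Bool → Int →
    List (List (String × Int)) → List (List (String × Int)) × Bool × Int
  | [], _, in_pause, start_ms, segs => (segs, in_pause, start_ms)
  | f :: rest, i, in_pause, start_ms, segs =>
    let t_ms := i * frame_ms
    if !f && !in_pause then
      pvAGo frame_ms rest (i + 1) true t_ms segs
    else if f && in_pause then
      pvAGo frame_ms rest (i + 1) false start_ms (segs ++ [pvMkSegA start_ms t_ms])
    else
      pvAGo frame_ms rest (i + 1) in_pause start_ms segs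

def speech_flags_to_pause_segments_py (flags : List Bool) (frame_ms : Int) :
    List (List (String × Int)) :=
  if flags = [] then []
  else
    let st := pvAGo frame_ms flags 0 false 0 []
    if st.2.1 then
      let duration_ms := (flags.length : Int) * frame_ms
      st.1 ++ [("start_ms", st.2.2), ("end_ms", duration_ms), ("duration_ms", duration_ms - st.2.2)] :: []
    else st.1

-- ===== PORT B =====
-- B's outer while loop: consume one maximal run of equal flags per step
def pvBGo (frame_ms : Int) : List Bool → Int → List (List (String × Int))
  | [], _ => []
  | v :: rest, i =>
    let n : Int := 1 + ((rest.takeWhile (· == v)).length : Int)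
    let tail := rest.dropWhile (· == v)
    let segs := pvBGo frame_ms tail (i + n)
    if v then segs
    else [("start_ms", i * frame_ms), ("end_ms", (i + n) * frame_ms), ("duration_ms", n * frame_ms)] :: segs
termination_by l => l.length
decreasing_by
  exact Nat.lt_succ_of_le (List.length_dropWhile_le _ _)

def speech_flags_to_pause_segments_py_alt (flags : List Bool) (frame_ms : Int) :
    List (List (String × Int)) :=
  pvBGo frame_ms flags 0

-- ===== PRECONDITION & SPEC =====
def Spec_speech_flags_to_pause_segments_py (flags : List Bool) (frame_ms : Int) (out : List (List (String × Int))) : Prop := out = speech_flags_to_pause_segments_py_alt flags frame_ms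
instance (flags : List Bool) (frame_ms : Int) (out : List (List (String × Int))) : Decidable (Spec_speech_flags_to_pause_segments_py flags frame_ms out) := by unfold Spec_speech_flags_to_pause_segments_py; infer_instance

-- ===== CLAIM (what is proved, stated in full; the proofs are below) =====
def Claim_equal_speech_flags_to_pause_segments_py : Prop := ∀ (flags : List Bool) (frame_ms : Int), Dom_speech_flags_to_pause_segments_py flags frame_ms → Spec_speech_flags_to_pause_segments_py flags frame_ms (speech_flags_to_pause_segments_py flags frame_ms)

-- ===== LEMMAS AND PROOFS =====

-- finishing step of A: flush a pending pause, with end time endI * frame_ms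
def pvFinish (frame_ms endI : Int) (st : List (List (String × Int)) × Bool × Int) :
    List (List (String × Int)) :=
  if st.2.1 then st.1 ++ [pvMkSegA st.2.2 (endI * frame_ms)] else st.1

-- skipping a True head run-by-run equals skipping it element-by-element
theorem pvBGo_true (frame_ms : Int) (t : List Bool) (i : Int) :
    pvBGo frame_ms (true :: t) i = pvBGo frame_ms t (i + 1) := by
  cases t with
  | nil => simp [pvBGo]
  | cons b t' =>
    cases b with
    | true =>
      rw [pvBGo, pvBGo]
      simp [List.takeWhile, List.dropWhile]
      ring_nf
    | false =>
      rw [pvBGo]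
      simp [List.takeWhile, List.dropWhile]

-- simultaneous invariant for A's loop vs B's run scan
theorem pvMain (frame_ms : Int) (t : List Bool) :
    (∀ (i s0 : Int) (segs : List (List (String × Int))),
        pvFinish frame_ms (i + t.length) (pvAGo frame_ms t i false s0 segs)
          = segs ++ pvBGo frame_ms t i) ∧
    (∀ (i s : Int) (segs : List (List (String × Int))),
        pvFinish frame_ms (i + t.length) (pvAGo frame_ms t i true s segs)
          = segs ++ pvMkSegA s ((i + ((t.takeWhile (· == false)).length : Int)) * frame_ms)
              :: pvBGo frame_ms (t.dropWhile (· == false)) (i + ((t.takeWhile (· == false)).length : Int))) := by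
  induction t with
  | nil =>
    constructor
    · intro i s0 segs; simp [pvAGo, pvFinish, pvBGo]
    · intro i s segs; simp [pvAGo, pvFinish, pvBGo]
  | cons b t ih =>
    obtain ⟨ihL, ihQ⟩ := ih
    constructor
    · intro i s0 segs
      cases b with
      | true =>
        rw [pvAGo]
        simp only [Bool.not_true, Bool.not_false, Bool.false_and, Bool.true_and, Bool.and_false,
          reduceIte, List.length_cons]
        push_cast
        rw [show i + ((t.length : Int) + 1) = (i + 1) + t.length from by ring, ihL, pvBGo_true]
      | false =>
        rw [pvAGo]
        simp only [Bool.not_false, Bool.true_and, reduceIte, List.length_cons]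
        push_cast
        rw [show i + ((t.length : Int) + 1) = (i + 1) + t.length from by ring, ihQ, pvBGo]
        simp only [pvMkSegA]
        push_cast
        ring_nf
    · intro i s segs
      cases b with
      | false =>
        rw [pvAGo]
        simp only [Bool.not_false, Bool.not_true, Bool.true_and, Bool.false_and, Bool.and_false,
          reduceIte, List.length_cons, List.takeWhile_cons, List.dropWhile_cons]
        push_cast
        rw [show i + ((t.length : Int) + 1) = (i + 1) + t.length from by ring, ihQ]
        simp only [pvMkSegA, beq_self_eq_true, reduceIte, List.length_cons]
        push_cast
        ring_nf
      | true =>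
        rw [pvAGo]
        simp only [Bool.not_true, Bool.false_and, Bool.true_and, Bool.and_true, Bool.and_false,
          reduceIte, List.length_cons, List.takeWhile_cons, List.dropWhile_cons]
        push_cast
        rw [show i + ((t.length : Int) + 1) = (i + 1) + t.length from by ring, ihL]
        simp [pvBGo_true]

theorem speech_flags_to_pause_segments_py_spec : Claim_equal_speech_flags_to_pause_segments_py := by
  intro flags frame_ms _
  unfold Spec_speech_flags_to_pause_segments_py speech_flags_to_pause_segments_py
    speech_flags_to_pause_segments_py_alt
  by_cases h : flags = []
  · subst h; simp [pvBGo]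
  · simp only [if_neg h]
    have := (pvMain frame_ms flags).1 0 0 []
    simp only [zero_add, List.nil_append] at this
    rw [← this]
    unfold pvFinish pvMkSegA
    split <;> simp
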